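-- pv_equiv track=rewrite | github.com/nanjiamoomoo/algorithms_python | Heap and BFS/kth_smallest_in_two_sorted_array.py | kth_smallest_in_two_sorted_array
-- ===== SOURCE A (Python) =====
-- import heapq
--
-- def kth_smallest_in_two_sorted_array(a: list, b: list, k: int) -> int:
--     visited = []
--     for x in a:
--         for y in b:
--             visited.append(False)
--
--     heap = []
--     heapq.heappush(heap, (a[0] + b[0], 0, 0))
--     visited[0] = True
--
--     while k > 1:
--         curr = heapq.heappop(heap)
--         for x, y in ([curr[1] + 1, curr[2]],[curr[1], curr[2] + 1]):
--             if 0 <= x < len(a) and 0 <= y < len(b) and not visited[len(b) * x + y]: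
--                 heapq.heappush(heap, (a[x] + b[y], x, y))
--                 visited[len(b) * x + y] = True
--         k -= 1
--
--     return heapq.heappop(heap)[0]
-- ===== SOURCE B (Python) =====
-- def kth_smallest_in_two_sorted_array(a: list, b: list, k: int) -> int:
--     # Frontier scan instead of heap + m*n visited matrix: keep the expansion
--     # frontier as a plain list, pick its minimum-sum cell by a linear scan,
--     # and remember already-generated cells in a hash set of coordinate pairs.
--     frontier = [(0, 0)]
--     seen = {(0, 0)}
--     while k > 1:
--         _, x, y = min((a[p] + b[q], p, q) for p, q in frontier)
--         frontier.remove((x, y))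
--         for nb in ((x + 1, y), (x, y + 1)):
--             if nb[0] < len(a) and nb[1] < len(b) and nb not in seen:
--                 frontier.append(nb)
--                 seen.add(nb)
--         k -= 1
--     return min(a[p] + b[q] for p, q in frontier)
-- ===== Notes on version B (the rewrite author's own statement) =====
-- stated objective: alternative
-- what changed: Replaces the heap plus the preallocated m*n visited boolean matrix with a plain frontier list whose minimum-sum cell is found by a linear scan each round, and a hash set of coordinate pairs for already-generated cells.
import Mathlib
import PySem

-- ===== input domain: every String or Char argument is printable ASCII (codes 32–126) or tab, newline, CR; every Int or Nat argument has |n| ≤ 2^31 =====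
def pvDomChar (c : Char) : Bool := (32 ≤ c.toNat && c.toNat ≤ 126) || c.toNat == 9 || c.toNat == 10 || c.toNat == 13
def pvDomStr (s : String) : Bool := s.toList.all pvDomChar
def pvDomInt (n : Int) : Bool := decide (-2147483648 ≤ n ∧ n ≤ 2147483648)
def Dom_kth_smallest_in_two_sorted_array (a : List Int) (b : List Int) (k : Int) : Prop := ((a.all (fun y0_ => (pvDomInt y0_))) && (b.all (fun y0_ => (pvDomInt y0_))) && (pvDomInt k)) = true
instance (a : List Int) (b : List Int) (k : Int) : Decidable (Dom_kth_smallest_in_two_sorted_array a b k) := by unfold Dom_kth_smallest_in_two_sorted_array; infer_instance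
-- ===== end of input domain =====

-- B replaces A's heap and preallocated m*n visited matrix by a min-scanned frontier list
-- plus a set of seen coordinate pairs (objective: alternative, same results, no heap/matrix).

-- ===== PORT A =====
-- Python tuple comparison '<' on (sum, x, y) triples.
def pvLex3Lt (p q : Int × Int × Int) : Bool :=
  decide (p.1 < q.1 ∨ (p.1 = q.1 ∧ (p.2.1 < q.2.1 ∨ (p.2.1 = q.2.1 ∧ p.2.2 < q.2.2))))

-- min of a nonempty collection of triples, first minimal kept (Python min / heap pop order).
def pvMin3 (p : Int × Int × Int) (l : List (Int × Int × Int)) : Int × Int × Int :=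
  l.foldl (fun m x => if pvLex3Lt x m then x else m) p

-- 'visited': the nested  for x in a: for y in b: visited.append(False)  loops.
def pvVisitedInit (a b : List Int) : List Bool :=
  a.foldl (fun acc _ => b.foldl (fun acc2 _ => acc2 ++ [false]) acc) []

-- the body of  for x, y in (...):  guard, heappush, mark visited.
-- heapq is modelled as a bag: heappush appends, heappop removes the (unique) minimum —
-- exact for the pop sequence, the only thing the Python observes of the heap.
def pvPushA (a b : List Int) (st : List (Int × Int × Int) × List Bool) (xy : Int × Int) :
    List (Int × Int × Int) × List Bool :=
  if 0 ≤ xy.1 ∧ xy.1 < PySem.List.len a ∧ 0 ≤ xy.2 ∧ xy.2 < PySem.List.len b ∧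
      ¬ (PySem.List.pyGetD st.2 (PySem.List.len b * xy.1 + xy.2) false = true) then
    (st.1 ++ [(PySem.List.pyGetD a xy.1 0 + PySem.List.pyGetD b xy.2 0, xy.1, xy.2)],
     PySem.List.pySetD st.2 (PySem.List.len b * xy.1 + xy.2) true)
  else st

-- the  while k > 1  loop; none = Python raises IndexError popping an empty heap.
def pvLoopA (a b : List Int) : Nat → List (Int × Int × Int) × List Bool →
    Option (List (Int × Int × Int) × List Bool)
  | 0, st => some st
  | n + 1, st =>
    match st.1 with
    | [] => none
    | c :: t =>
      let curr := pvMin3 c t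
      pvLoopA a b n ([(curr.2.1 + 1, curr.2.2), (curr.2.1, curr.2.2 + 1)].foldl
        (pvPushA a b) ((c :: t).erase curr, st.2))

def kth_smallest_in_two_sorted_array (a : List Int) (b : List Int) (k : Int) : Int :=
  -- heap = [(a[0] + b[0], 0, 0)] (pyGetD is exact when a, b are nonempty (Pre_),
  -- IndexError otherwise), visited[0] = True, then the while loop.
  match pvLoopA a b (k - 1).toNat
      ([(PySem.List.pyGetD a 0 0 + PySem.List.pyGetD b 0 0, 0, 0)],
        PySem.List.pySetD (pvVisitedInit a b) 0 true) with
  | none => 0            -- Python raises IndexError here; excluded by Pre_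
  | some st =>
    match st.1 with
    | [] => 0            -- Python raises IndexError here; excluded by Pre_
    | c :: t => (pvMin3 c t).1

-- ===== PORT B =====
-- the triple (a[p] + b[q], p, q) built inside B's min(...) generator.
def pvTripleOf (a b : List Int) (p : Int × Int) : Int × Int × Int :=
  (PySem.List.pyGetD a p.1 0 + PySem.List.pyGetD b p.2 0, p.1, p.2)

-- body of  for nb in ((x+1, y), (x, y+1)):  bounds / seen guard, append, add.
def pvGrow (a b : List Int) (st : List (Int × Int) × PySem.Set (Int × Int)) (nb : Int × Int) :
    List (Int × Int) × PySem.Set (Int × Int) :=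
  if nb.1 < PySem.List.len a ∧ nb.2 < PySem.List.len b ∧ ¬ nb ∈ st.2 then
    (st.1 ++ [nb], PySem.Set.add st.2 nb)
  else st

-- B's  while k > 1  loop; none = Python's min() raises ValueError on an empty frontier.
def pvLoopB (a b : List Int) : Nat → List (Int × Int) × PySem.Set (Int × Int) →
    Option (List (Int × Int) × PySem.Set (Int × Int))
  | 0, st => some st
  | n + 1, st =>
    match st.1 with
    | [] => none
    | p :: rest =>
      let best := pvMin3 (pvTripleOf a b p) (rest.map (pvTripleOf a b))
      pvLoopB a b n ([(best.2.1 + 1, best.2.2), (best.2.1, best.2.2 + 1)].foldl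
        (pvGrow a b)
        ((PySem.List.remove? st.1 (best.2.1, best.2.2)).getD st.1, st.2))

def kth_smallest_in_two_sorted_array_alt (a : List Int) (b : List Int) (k : Int) : Int :=
  match pvLoopB a b (k - 1).toNat ([(0, 0)], PySem.Set.ofList [((0 : Int), (0 : Int))]) with
  | none => 0            -- Python raises ValueError here; excluded by Pre_
  | some st =>
    match st.1 with
    | [] => 0            -- Python raises ValueError here; excluded by Pre_
    | p :: rest =>       -- min(a[p] + b[q] for p, q in frontier)
      (rest.map (fun q => PySem.List.pyGetD a q.1 0 + PySem.List.pyGetD b q.2 0)).foldl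
        (fun m s => if s < m then s else m)
        (PySem.List.pyGetD a p.1 0 + PySem.List.pyGetD b p.2 0)

-- ===== PRECONDITION & SPEC =====
-- Pre_ is exactly where Python A returns: nonempty arrays (a[0] + b[0] raises IndexError
-- otherwise) and k ≤ len(a) * len(b) (otherwise the heap is exhausted and heappop raises).
def Pre_kth_smallest_in_two_sorted_array (a : List Int) (b : List Int) (k : Int) : Prop :=
  a ≠ [] ∧ b ≠ [] ∧ k ≤ (a.length : Int) * (b.length : Int)
instance (a : List Int) (b : List Int) (k : Int) : Decidable (Pre_kth_smallest_in_two_sorted_array a b k) := by unfold Pre_kth_smallest_in_two_sorted_array; infer_instance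
def pvWitness_kth_smallest_in_two_sorted_array : List Int × List Int × Int := ([1, 3], [2], 2)

def Spec_kth_smallest_in_two_sorted_array (a : List Int) (b : List Int) (k : Int) (out : Int) : Prop := out = kth_smallest_in_two_sorted_array_alt a b k
instance (a : List Int) (b : List Int) (k : Int) (out : Int) : Decidable (Spec_kth_smallest_in_two_sorted_array a b k out) := by unfold Spec_kth_smallest_in_two_sorted_array; infer_instance

-- ===== CLAIM (what is proved, stated in full; the proofs are below) =====
def Claim_equal_kth_smallest_in_two_sorted_array : Prop := ∀ (a : List Int) (b : List Int) (k : Int), Dom_kth_smallest_in_two_sorted_array a b k → Pre_kth_smallest_in_two_sorted_array a b k → Spec_kth_smallest_in_two_sorted_array a b k (kth_smallest_in_two_sorted_array a b k)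

-- ===== LEMMAS AND PROOFS =====

-- The simulation invariant between A's state (heap, visited) and B's (frontier, seen).
def pvInv (a b : List Int) (sa : List (Int × Int × Int) × List Bool)
    (sb : List (Int × Int) × PySem.Set (Int × Int)) : Prop :=
  sa.1 = sb.1.map (pvTripleOf a b) ∧
  sb.1.Nodup ∧
  (∀ p ∈ sb.1, 0 ≤ p.1 ∧ 0 ≤ p.2) ∧
  (∀ p ∈ sb.1, p ∈ sb.2) ∧
  sa.2.length = a.length * b.length ∧
  (∀ x y : Int, 0 ≤ x → x < a.length → 0 ≤ y → y < b.length →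
    (PySem.List.pyGetD sa.2 ((b.length : Int) * x + y) false = true ↔ (x, y) ∈ sb.2))

theorem pvTripleOf_inj (a b : List Int) : Function.Injective (pvTripleOf a b) := by
  intro p q h
  simp only [pvTripleOf, Prod.mk.injEq] at h
  exact Prod.ext h.2.1 h.2.2

theorem pvMin3_mem (p : Int × Int × Int) (l : List (Int × Int × Int)) :
    pvMin3 p l ∈ p :: l := by
  induction l generalizing p with
  | nil => simp [pvMin3]
  | cons x l ih =>
    simp only [pvMin3, List.foldl_cons]
    by_cases hc : pvLex3Lt x p = true
    · rw [if_pos hc]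
      have h := ih x
      simp only [pvMin3] at h
      rcases List.mem_cons.mp h with h | h <;> simp [h]
    · rw [if_neg hc]
      have h := ih p
      simp only [pvMin3] at h
      rcases List.mem_cons.mp h with h | h <;> simp [h]

theorem pvMin3_fst (p : Int × Int × Int) (l : List (Int × Int × Int)) :
    (pvMin3 p l).1 = (l.map (·.1)).foldl (fun m s => if s < m then s else m) p.1 := by
  induction l generalizing p with
  | nil => simp [pvMin3]
  | cons x l ih =>
    simp only [pvMin3, List.foldl_cons, List.map_cons] at *
    rw [ih]
    congr 1
    by_cases hc : pvLex3Lt x p = true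
    · simp only [hc, if_true]
      simp only [pvLex3Lt, decide_eq_true_eq] at hc
      rcases hc with h | ⟨h, _⟩ <;> simp [h]
    · simp only [hc, Bool.false_eq_true, if_false]
      simp only [pvLex3Lt, decide_eq_true_eq, not_or, not_and, not_lt] at hc
      have : ¬ x.1 < p.1 := by omega
      simp [this]

-- index map (x, y) ↦ n*x + y is injective on the grid.
theorem pvIdxInj (n x y x' y' : Int) (hy : 0 ≤ y) (hy' : y < n) (hz : 0 ≤ y')
    (hz' : y' < n) (h : n * x + y = n * x' + y') : x = x' ∧ y = y' := by
  have hn : 0 < n := by omega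
  have h1 : x ≤ x' := by nlinarith
  have h2 : x' ≤ x := by nlinarith
  have : x = x' := le_antisymm h1 h2
  subst this
  exact ⟨rfl, by omega⟩

theorem pvIdxBounds (m n x y : Int) (hx : 0 ≤ x) (hxm : x < m) (hy : 0 ≤ y) (hyn : y < n) :
    0 ≤ n * x + y ∧ n * x + y < m * n := by
  have h1 : 0 ≤ n * x := mul_nonneg (by omega) hx
  exact ⟨by omega, by nlinarith⟩

theorem pvVisitedInit_eq (a b : List Int) :
    pvVisitedInit a b = List.replicate (a.length * b.length) false := by
  have inner : ∀ (acc : List Bool),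
      b.foldl (fun acc2 _ => acc2 ++ [false]) acc = acc ++ List.replicate b.length false := by
    intro acc
    induction b generalizing acc with
    | nil => simp
    | cons x b ih => simp [ih, List.replicate_succ]
  have outer : ∀ (acc : List Bool),
      a.foldl (fun acc _ => b.foldl (fun acc2 _ => acc2 ++ [false]) acc) acc =
        acc ++ List.replicate (a.length * b.length) false := by
    intro acc
    induction a generalizing acc with
    | nil => simp
    | cons x a ih =>
      simp only [List.foldl_cons, List.length_cons]
      rw [inner, ih, List.append_assoc, ← List.replicate_add]
      congr 2
      ring
  unfold pvVisitedInit
  rw [outer []]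
  simp

-- one guarded push preserves the invariant (nb has nonnegative coordinates).
theorem pvPush_sim (a b : List Int) (sa : List (Int × Int × Int) × List Bool)
    (sb : List (Int × Int) × PySem.Set (Int × Int)) (nb : Int × Int)
    (hInv : pvInv a b sa sb) (hx : 0 ≤ nb.1) (hy : 0 ≤ nb.2) :
    pvInv a b (pvPushA a b sa nb) (pvGrow a b sb nb) := by
  obtain ⟨hH, hN, hG, hS, hL, hV⟩ := hInv
  simp only [pvPushA, pvGrow, PySem.List.len_eq]
  by_cases hxa : nb.1 < (a.length : Int)
  · by_cases hyb : nb.2 < (b.length : Int)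
    · have hbit := hV nb.1 nb.2 hx hxa hy hyb
      rw [Prod.mk.eta] at hbit
      by_cases hs : nb ∈ sb.2
      · rw [if_neg (fun hc => hc.2.2.2.2 (hbit.mpr hs)), if_neg (fun hc => hc.2.2 hs)]
        exact ⟨hH, hN, hG, hS, hL, hV⟩
      · have hbitf : ¬ PySem.List.pyGetD sa.2 ((b.length : Int) * nb.1 + nb.2) false = true := by
          simp [hbit, hs]
        rw [if_pos ⟨hx, hxa, hy, hyb, hbitf⟩, if_pos ⟨hxa, hyb, hs⟩]
        have hnbfr : nb ∉ sb.1 := fun h => hs (hS nb h)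
        have hidxnb := pvIdxBounds (a.length : Int) (b.length : Int) nb.1 nb.2 hx hxa hy hyb
        refine ⟨?_, ?_, ?_, ?_, ?_, ?_⟩
        · simp [List.map_append, hH, pvTripleOf]
        · rw [List.nodup_append]
          refine ⟨hN, List.nodup_singleton _, ?_⟩
          intro u hu v hv
          rw [List.mem_singleton] at hv
          subst hv
          intro hEq
          exact hnbfr (hEq ▸ hu)
        · intro p hp
          rcases List.mem_append.mp hp with h | h
          · exact hG p h
          · simp at h; subst h; exact ⟨hx, hy⟩
        · intro p hp
          rcases List.mem_append.mp hp with h | h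
          · exact (PySem.Set.mem_add _ _ _).mpr (Or.inl (hS p h))
          · simp at h; subst h; exact (PySem.Set.mem_add _ _ _).mpr (Or.inr rfl)
        · rw [PySem.List.length_pySetD]; exact hL
        · intro x y hx0 hxm hy0 hyn
          have hidx := pvIdxBounds (a.length : Int) (b.length : Int) x y hx0 hxm hy0 hyn
          rw [PySem.List.pySetD_of_nonneg _ _ hidxnb.1]
          rw [PySem.List.pyGetD_eq_getElem _ _ hidx.1
            (by rw [List.length_set, hL]; push_cast; exact hidx.2)]
          rw [List.getElem_set]
          rw [PySem.Set.mem_add _ _ _]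
          by_cases heq : (x, y) = nb
          · have hxeq : x = nb.1 := congrArg Prod.fst heq
            have hyeq : y = nb.2 := congrArg Prod.snd heq
            subst hxeq; subst hyeq
            simp [heq]
          · have hne : ((b.length : Int) * nb.1 + nb.2).toNat ≠ ((b.length : Int) * x + y).toNat := by
              intro hEq
              have : (b.length : Int) * nb.1 + nb.2 = (b.length : Int) * x + y := by omega
              obtain ⟨h1, h2⟩ := pvIdxInj (b.length : Int) nb.1 nb.2 x y hy hyb hy0 hyn this
              exact heq (by rw [← h1, ← h2])
            rw [if_neg hne]
            rw [← PySem.List.pyGetD_eq_getElem sa.2 false hidx.1 (by push_cast [hL]; exact hidx.2)]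
            rw [hV x y hx0 hxm hy0 hyn]
            simp [heq]
    · rw [if_neg (by tauto), if_neg (by tauto)]
      exact ⟨hH, hN, hG, hS, hL, hV⟩
  · rw [if_neg (by tauto), if_neg (by tauto)]
    exact ⟨hH, hN, hG, hS, hL, hV⟩

theorem pvLoop_sim (a b : List Int) (fuel : Nat)
    (sa : List (Int × Int × Int) × List Bool) (sb : List (Int × Int) × PySem.Set (Int × Int))
    (hInv : pvInv a b sa sb) :
    (pvLoopA a b fuel sa = none ∧ pvLoopB a b fuel sb = none) ∨
    (∃ sa' sb', pvLoopA a b fuel sa = some sa' ∧ pvLoopB a b fuel sb = some sb' ∧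
      pvInv a b sa' sb') := by
  induction fuel generalizing sa sb with
  | zero => exact Or.inr ⟨sa, sb, rfl, rfl, hInv⟩
  | succ n ih =>
    obtain ⟨heap, vis⟩ := sa
    obtain ⟨fr, seen⟩ := sb
    obtain ⟨hH, hN, hG, hS, hL, hV⟩ := hInv
    cases fr with
    | nil =>
      simp only [List.map_nil] at hH
      subst hH
      left
      exact ⟨rfl, rfl⟩
    | cons p rest =>
      simp only [List.map_cons] at hH
      subst hH
      simp only [pvLoopA, pvLoopB, List.foldl_cons, List.foldl_nil]
      have hmem : pvMin3 (pvTripleOf a b p) (rest.map (pvTripleOf a b)) ∈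
          (p :: rest).map (pvTripleOf a b) := by
        rw [List.map_cons]; exact pvMin3_mem _ _
      obtain ⟨q, hq, hfq⟩ := List.mem_map.mp hmem
      have hq1 : (pvMin3 (pvTripleOf a b p) (rest.map (pvTripleOf a b))).2.1 = q.1 := by
        rw [← hfq]; rfl
      have hq2 : (pvMin3 (pvTripleOf a b p) (rest.map (pvTripleOf a b))).2.2 = q.2 := by
        rw [← hfq]; rfl
      rw [hq1, hq2, Prod.mk.eta, PySem.List.remove?_eq_some_erase _ q hq, Option.getD_some,
        ← List.map_cons, ← hfq, ← List.map_erase (pvTripleOf_inj a b)]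
      have hq0 := hG q hq
      have midInv : pvInv a b (((p :: rest).erase q).map (pvTripleOf a b), vis)
          ((p :: rest).erase q, seen) := by
        refine ⟨rfl, hN.erase q, ?_, ?_, hL, hV⟩
        · exact fun p' hp' => hG p' (List.mem_of_mem_erase hp')
        · exact fun p' hp' => hS p' (List.mem_of_mem_erase hp')
      exact ih _ _ (pvPush_sim a b _ _ (q.1, q.2 + 1)
        (pvPush_sim a b _ _ (q.1 + 1, q.2) midInv (by omega) hq0.2)
        hq0.1 (by omega))

-- ===== VERDICT (by name: the statement is the Claim_ definition above) =====
-- the initial states of the two loops satisfy the invariant.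
theorem pvInvInit (a b : List Int) : pvInv a b
    ([(PySem.List.pyGetD a 0 0 + PySem.List.pyGetD b 0 0, 0, 0)],
      PySem.List.pySetD (pvVisitedInit a b) 0 true)
    ([(0, 0)], PySem.Set.ofList [((0 : Int), (0 : Int))]) := by
  refine ⟨rfl, by simp, by simp, by simp [PySem.Set.mem_ofList], ?_, ?_⟩
  · rw [PySem.List.length_pySetD, pvVisitedInit_eq, List.length_replicate]
  · intro x y hx0 hxm hy0 hyn
    have hidx := pvIdxBounds (a.length : Int) (b.length : Int) x y hx0 hxm hy0 hyn
    rw [pvVisitedInit_eq, PySem.List.pySetD_of_nonneg _ _ (by norm_num : (0:Int) ≤ 0)]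
    rw [PySem.List.pyGetD_eq_getElem _ _ hidx.1
      (by rw [List.length_set, List.length_replicate]; push_cast; exact hidx.2)]
    rw [List.getElem_set]
    simp only [Int.toNat_zero]
    constructor
    · intro hbit
      by_cases h0 : 0 = ((b.length : Int) * x + y).toNat
      · have hz : (b.length : Int) * x + y = (b.length : Int) * 0 + 0 := by omega
        obtain ⟨hx', hy'⟩ := pvIdxInj _ x y 0 0 hy0 hyn (le_refl 0) (by omega) hz
        simp [PySem.Set.mem_ofList, hx', hy']
      · rw [if_neg h0] at hbit
        simp at hbit
    · intro hmem
      simp [PySem.Set.mem_ofList] at hmem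
      obtain ⟨hx', hy'⟩ := hmem
      subst hx'; subst hy'
      simp

-- ===== VERDICT (by name: the statement is the Claim_ definition above) =====
theorem kth_smallest_in_two_sorted_array_spec : Claim_equal_kth_smallest_in_two_sorted_array := by
  intro a b k _hdom _hpre
  unfold Spec_kth_smallest_in_two_sorted_array kth_smallest_in_two_sorted_array
    kth_smallest_in_two_sorted_array_alt
  rcases pvLoop_sim a b (k - 1).toNat _ _ (pvInvInit a b) with ⟨hA, hB⟩ | ⟨sa', sb', hA, hB, hInv⟩
  · rw [hA, hB]
  · rw [hA, hB]
    obtain ⟨heap', vis'⟩ := sa'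
    obtain ⟨fr', seen'⟩ := sb'
    obtain ⟨hH, -, -, -, -, -⟩ := hInv
    cases fr' with
    | nil =>
      simp only [List.map_nil] at hH
      subst hH
      rfl
    | cons p rest =>
      simp only [List.map_cons] at hH
      subst hH
      show (pvMin3 (pvTripleOf a b p) (rest.map (pvTripleOf a b))).1 = _
      rw [pvMin3_fst]
      simp only [List.map_map]
      rfl
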